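-- pv_equiv track=rewrite | github.com/sianux1209/algorithm_study | programmers/toWeirdCase.py | toWeirdCase
-- ===== SOURCE A (Python) =====
-- def toWeirdCase(s):
--     # 함수를 완성하세요
--     words = s.split()
--
--     space = []
--     newWords = []
--
--     for i in range(len(s)):
--     	if s[i].isspace():
--     		space.append(i)
--
--     for word in words:
--     	newWord = ''
--     	for i in range(len(word)):
--     		if i % 2 == 0 :
--     			newWord += word[i].upper()
--
--     		else:
--     			newWord += word[i].lower()
--
--     	newWords.append(newWord)
--
--     newWords = list(''.join(newWords))
--
--     for sp in space:
--     	newWords.insert(sp, ' ')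
--
--     return ''.join(newWords)
-- ===== SOURCE B (Python) =====
-- def toWeirdCase(s):
--     out = []
--     k = 0
--     for c in s:
--         if c.isspace():
--             out.append(c)
--             k = 0
--         else:
--             out.append(c.upper() if k % 2 == 0 else c.lower())
--             k += 1
--     return ''.join(out)
-- ===== Notes on version B (the rewrite author's own statement) =====
-- stated objective: simpler
-- what changed: Replaces A's four-pass pipeline (split into words, collect whitespace indices, rebuild each word by index, then quadratic list.insert of a space at every whitespace position) with a single pass over the string that toggles case with a counter reset at whitespace.
-- intended difference: On strings containing a whitespace character other than the plain space character (tab, newline, CR), A replaces each such character with a plain space (it re-inserts a space at every recorded whitespace index), while B preserves the original character; preserving the original spacing is the intended behaviour. — e.g. on toWeirdCase("a\tb"): A returns "A B", B returns "A\tB"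
import Mathlib
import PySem

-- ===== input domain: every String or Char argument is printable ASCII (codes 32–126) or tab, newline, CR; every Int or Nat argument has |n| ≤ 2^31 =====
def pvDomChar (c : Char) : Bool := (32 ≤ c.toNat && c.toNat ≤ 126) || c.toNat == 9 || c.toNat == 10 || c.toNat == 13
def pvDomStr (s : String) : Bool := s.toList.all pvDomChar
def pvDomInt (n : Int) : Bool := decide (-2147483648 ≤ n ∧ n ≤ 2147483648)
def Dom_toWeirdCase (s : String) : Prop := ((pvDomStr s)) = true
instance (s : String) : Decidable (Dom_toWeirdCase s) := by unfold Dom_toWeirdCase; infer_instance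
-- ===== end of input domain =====

-- B is a single pass toggling case with a counter reset at whitespace (A rebuilds words and
-- re-inserts spaces index by index); B preserves non-space whitespace where A flattens it to a space (see D_).

-- ===== PORT A =====
def toWeirdCase (s : String) : String :=
  let cs := s.toList
  let words := PySem.Chars.split₀ cs
  let space := (PySem.List.pyRange 0 (PySem.Chars.len cs : Int) 1).foldl
      (fun acc i => if PySem.Chars.isspace (PySem.List.pyGetD cs i ' ') then acc ++ [i] else acc) []
  let newWords := words.foldl (fun acc word =>
      acc ++ [(PySem.List.pyRange 0 (PySem.Chars.len word : Int) 1).foldl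
        (fun nw i => if PySem.Int.mod i 2 == 0
          then nw ++ [PySem.Chars.upperChar (PySem.List.pyGetD word i ' ')]
          else nw ++ [PySem.Chars.lowerChar (PySem.List.pyGetD word i ' ')]) []]) []
  let joined := PySem.Chars.join [] newWords
  let final := space.foldl (fun l sp => PySem.List.insert l sp ' ') joined
  String.ofList final

-- ===== PORT B =====
def bGo : List Char → Nat → List Char
  | [], _ => []
  | c :: cs, k =>
    if PySem.Chars.isspace c then c :: bGo cs 0
    else (if k % 2 == 0 then PySem.Chars.upperChar c else PySem.Chars.lowerChar c) :: bGo cs (k + 1)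

def toWeirdCase_alt (s : String) : String := String.ofList (bGo s.toList 0)

-- ===== PRECONDITION & SPEC =====
-- On strings containing a whitespace character other than the plain space character (tab, newline, CR),
-- A replaces each such character with a plain space, while B preserves it; preserving the original spacing is intended.
def D_toWeirdCase (s : String) : Prop := (s.toList.any (fun c => PySem.Chars.isspace c && !(c == ' '))) = true
instance (s : String) : Decidable (D_toWeirdCase s) := by unfold D_toWeirdCase; infer_instance

def Spec_toWeirdCase (s : String) (out : String) : Prop := ¬ D_toWeirdCase s → out = toWeirdCase_alt s
instance (s : String) (out : String) : Decidable (Spec_toWeirdCase s out) := by unfold Spec_toWeirdCase; infer_instance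

def pvDiffWitness_toWeirdCase : String := "a\tb"
def pvDiffWitnessOut_toWeirdCase : String × String := ("A B", "A\tB")

-- ===== CLAIM (what is proved, stated in full; the proofs are below) =====
def Claim_unchanged_toWeirdCase : Prop := ∀ (s : String), Dom_toWeirdCase s → Spec_toWeirdCase s (toWeirdCase s)
def Claim_changed_toWeirdCase : Prop := Dom_toWeirdCase (pvDiffWitness_toWeirdCase) ∧ D_toWeirdCase (pvDiffWitness_toWeirdCase) ∧ toWeirdCase (pvDiffWitness_toWeirdCase) = pvDiffWitnessOut_toWeirdCase.1 ∧ toWeirdCase_alt (pvDiffWitness_toWeirdCase) = pvDiffWitnessOut_toWeirdCase.2 ∧ pvDiffWitnessOut_toWeirdCase.1 ≠ pvDiffWitnessOut_toWeirdCase.2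
def Claim_exact_toWeirdCase : Prop := ∀ (s : String), Dom_toWeirdCase s → D_toWeirdCase s → toWeirdCase s ≠ toWeirdCase_alt s

-- ===== LEMMAS AND PROOFS =====

-- proof-side reference functions
def splitSpec : List Char → List (List Char)
  | [] => []
  | c :: cs =>
    if PySem.Chars.isspace c then splitSpec cs
    else (c :: cs.takeWhile (fun x => !PySem.Chars.isspace x)) ::
         splitSpec (cs.dropWhile (fun x => !PySem.Chars.isspace x))
termination_by cs => cs.length
decreasing_by
  · simp
  · have := List.length_dropWhile_le (fun x => !PySem.Chars.isspace x) cs; simp; omega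

def wdFrom : List Char → Nat → List Char
  | [], _ => []
  | c :: cs, k => (if k % 2 == 0 then PySem.Chars.upperChar c else PySem.Chars.lowerChar c) :: wdFrom cs (k + 1)

def spacesIdx : List Char → Nat → List Int
  | [], _ => []
  | c :: cs, k => if PySem.Chars.isspace c then (k : Int) :: spacesIdx cs (k + 1) else spacesIdx cs (k + 1)

-- what A computes, char by char: like bGo but every whitespace char becomes ' '
def aGo : List Char → Nat → List Char
  | [], _ => []
  | c :: cs, k =>
    if PySem.Chars.isspace c then ' ' :: aGo cs 0
    else (if k % 2 == 0 then PySem.Chars.upperChar c else PySem.Chars.lowerChar c) :: aGo cs (k + 1)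

lemma go_splitSpec : ∀ (cs cur : List Char) (acc : List (List Char)),
    PySem.Chars.split₀.go cs cur acc =
      acc.reverse ++ (if cur.isEmpty then splitSpec cs
        else (cur.reverse ++ cs.takeWhile (fun x => !PySem.Chars.isspace x)) ::
             splitSpec (cs.dropWhile (fun x => !PySem.Chars.isspace x))) := by
  intro cs
  induction cs with
  | nil =>
    intro cur acc
    rw [PySem.Chars.split₀.go]
    cases cur <;> simp [splitSpec]
  | cons c rest ih =>
    intro cur acc
    rw [PySem.Chars.split₀.go]
    by_cases hc : PySem.Chars.isspace c = true
    · cases cur with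
      | nil => simp [hc, ih, splitSpec]
      | cons u us =>
        simp [hc, ih, splitSpec]
    · cases cur with
      | nil => simp [hc, ih, splitSpec]
      | cons u us => simp [hc, ih, List.takeWhile, List.dropWhile]

lemma split₀_eq_splitSpec (cs : List Char) : PySem.Chars.split₀ cs = splitSpec cs := by
  simpa using go_splitSpec cs [] []

lemma join_nil_eq_flatten (ws : List (List Char)) : PySem.Chars.join [] ws = ws.flatten := by
  induction ws with
  | nil => simp [PySem.Chars.join_nil]
  | cons w ws ih =>
    cases ws with
    | nil => simp [PySem.Chars.join_singleton]
    | cons b rest => simp [PySem.Chars.join_cons_cons] at *; simp [ih]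

lemma getD_mid (pre : List Char) (x : Char) (xs : List Char) (d : Char) :
    PySem.List.pyGetD (pre ++ x :: xs) (pre.length : Int) d = x := by
  rw [PySem.List.pyGetD_natCast]
  simp [List.getD]

lemma mod_cast_beq (k : Nat) : (PySem.Int.mod (k : Int) 2 == 0) = (k % 2 == 0) := by
  have h : PySem.Int.mod (k : Int) 2 = ((k % 2 : Nat) : Int) := by
    exact_mod_cast PySem.Int.mod_natCast k 2
  rw [h]
  rcases Nat.mod_two_eq_zero_or_one k with h1 | h1 <;> simp [h1]

lemma insert_mid (pre l : List Char) :
    PySem.List.insert (pre ++ l) (pre.length : Int) ' ' = pre ++ ' ' :: l := by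
  rw [PySem.List.insert_natCast _ _ _ (by simp)]
  simp


lemma space_fold : ∀ (suf pre : List Char) (acc : List Int),
    (PySem.List.pyRange (pre.length : Int) ((pre ++ suf).length : Int) 1).foldl
      (fun a i => if PySem.Chars.isspace (PySem.List.pyGetD (pre ++ suf) i ' ') then a ++ [i] else a) acc
    = acc ++ spacesIdx suf pre.length := by
  intro suf
  induction suf with
  | nil =>
    intro pre acc
    rw [PySem.List.pyRange_one_eq_nil (by simp)]
    simp [spacesIdx]
  | cons x xs ih =>
    intro pre acc
    rw [PySem.List.pyRange_one_cons (by push_cast [List.length_append, List.length_cons]; omega)]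
    simp only [List.foldl_cons, getD_mid]
    have hre : pre ++ x :: xs = (pre ++ [x]) ++ xs := by simp
    have hlen : (pre.length : Int) + 1 = ((pre ++ [x]).length : Int) := by simp
    by_cases hx : PySem.Chars.isspace x = true
    · rw [if_pos hx, hlen]
      rw [show (PySem.List.pyRange ((pre ++ [x]).length : Int) ((pre ++ x :: xs).length : Int) 1) = (PySem.List.pyRange ((pre ++ [x]).length : Int) (((pre ++ [x]) ++ xs).length : Int) 1) by rw [← hre]]
      rw [show (fun (a : List Int) i => if PySem.Chars.isspace (PySem.List.pyGetD (pre ++ x :: xs) i ' ') then a ++ [i] else a) = (fun (a : List Int) i => if PySem.Chars.isspace (PySem.List.pyGetD ((pre ++ [x]) ++ xs) i ' ') then a ++ [i] else a) by rw [← hre]]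
      rw [ih (pre ++ [x]) (acc ++ [(pre.length : Int)])]
      simp [spacesIdx, hx]
    · rw [if_neg hx, hlen]
      rw [show (PySem.List.pyRange ((pre ++ [x]).length : Int) ((pre ++ x :: xs).length : Int) 1) = (PySem.List.pyRange ((pre ++ [x]).length : Int) (((pre ++ [x]) ++ xs).length : Int) 1) by rw [← hre]]
      rw [show (fun (a : List Int) i => if PySem.Chars.isspace (PySem.List.pyGetD (pre ++ x :: xs) i ' ') then a ++ [i] else a) = (fun (a : List Int) i => if PySem.Chars.isspace (PySem.List.pyGetD ((pre ++ [x]) ++ xs) i ' ') then a ++ [i] else a) by rw [← hre]]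
      rw [ih (pre ++ [x]) acc]
      simp [spacesIdx, hx]

lemma word_fold : ∀ (suf pre : List Char) (acc : List Char),
    (PySem.List.pyRange (pre.length : Int) ((pre ++ suf).length : Int) 1).foldl
      (fun nw i => if PySem.Int.mod i 2 == 0
        then nw ++ [PySem.Chars.upperChar (PySem.List.pyGetD (pre ++ suf) i ' ')]
        else nw ++ [PySem.Chars.lowerChar (PySem.List.pyGetD (pre ++ suf) i ' ')]) acc
    = acc ++ wdFrom suf pre.length := by
  intro suf
  induction suf with
  | nil =>
    intro pre acc
    rw [PySem.List.pyRange_one_eq_nil (by simp)]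
    simp [wdFrom]
  | cons x xs ih =>
    intro pre acc
    rw [PySem.List.pyRange_one_cons (by push_cast [List.length_append, List.length_cons]; omega)]
    simp only [List.foldl_cons, getD_mid, mod_cast_beq]
    have hre : pre ++ x :: xs = (pre ++ [x]) ++ xs := by simp
    have hlen : (pre.length : Int) + 1 = ((pre ++ [x]).length : Int) := by simp
    by_cases hx : pre.length % 2 == 0
    · rw [if_pos hx, hlen]
      rw [show (PySem.List.pyRange ((pre ++ [x]).length : Int) ((pre ++ x :: xs).length : Int) 1) = (PySem.List.pyRange ((pre ++ [x]).length : Int) (((pre ++ [x]) ++ xs).length : Int) 1) by rw [← hre]]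
      rw [show (fun (nw : List Char) i => if PySem.Int.mod i 2 == 0 then nw ++ [PySem.Chars.upperChar (PySem.List.pyGetD (pre ++ x :: xs) i ' ')] else nw ++ [PySem.Chars.lowerChar (PySem.List.pyGetD (pre ++ x :: xs) i ' ')]) = (fun (nw : List Char) i => if PySem.Int.mod i 2 == 0 then nw ++ [PySem.Chars.upperChar (PySem.List.pyGetD ((pre ++ [x]) ++ xs) i ' ')] else nw ++ [PySem.Chars.lowerChar (PySem.List.pyGetD ((pre ++ [x]) ++ xs) i ' ')]) by rw [← hre]]
      rw [ih (pre ++ [x]) (acc ++ [PySem.Chars.upperChar x])]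
      simp [wdFrom, hx]
    · rw [if_neg hx, hlen]
      rw [show (PySem.List.pyRange ((pre ++ [x]).length : Int) ((pre ++ x :: xs).length : Int) 1) = (PySem.List.pyRange ((pre ++ [x]).length : Int) (((pre ++ [x]) ++ xs).length : Int) 1) by rw [← hre]]
      rw [show (fun (nw : List Char) i => if PySem.Int.mod i 2 == 0 then nw ++ [PySem.Chars.upperChar (PySem.List.pyGetD (pre ++ x :: xs) i ' ')] else nw ++ [PySem.Chars.lowerChar (PySem.List.pyGetD (pre ++ x :: xs) i ' ')]) = (fun (nw : List Char) i => if PySem.Int.mod i 2 == 0 then nw ++ [PySem.Chars.upperChar (PySem.List.pyGetD ((pre ++ [x]) ++ xs) i ' ')] else nw ++ [PySem.Chars.lowerChar (PySem.List.pyGetD ((pre ++ [x]) ++ xs) i ' ')]) by rw [← hre]]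
      rw [ih (pre ++ [x]) (acc ++ [PySem.Chars.lowerChar x])]
      simp [wdFrom, hx]

lemma length_wdFrom (w : List Char) : ∀ k, (wdFrom w k).length = w.length := by
  induction w with
  | nil => intro k; rfl
  | cons c cs ih => intro k; simp [wdFrom, ih]

lemma spacesIdx_append_nonspace : ∀ (w t : List Char) (k : Nat),
    (∀ x ∈ w, PySem.Chars.isspace x = false) →
    spacesIdx (w ++ t) k = spacesIdx t (k + w.length) := by
  intro w
  induction w with
  | nil => intro t k _; simp
  | cons c cs ih =>
    intro t k h
    have hc := h c (by simp)
    simp [spacesIdx, hc, ih t (k + 1) (fun x hx => h x (by simp [hx]))]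
    ring_nf

lemma aGo_nonspace_append : ∀ (w t : List Char) (k : Nat),
    (∀ x ∈ w, PySem.Chars.isspace x = false) →
    aGo (w ++ t) k = wdFrom w k ++ aGo t (k + w.length) := by
  intro w
  induction w with
  | nil => intro t k _; simp [wdFrom]
  | cons c cs ih =>
    intro t k h
    have hc := h c (by simp)
    simp [aGo, wdFrom, hc, ih t (k + 1) (fun x hx => h x (by simp [hx]))]
    ring_nf

lemma aGo_head_space : ∀ (t : List Char) (k₁ k₂ : Nat),
    (∀ x ∈ t.head?, PySem.Chars.isspace x = true) → aGo t k₁ = aGo t k₂ := by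
  intro t k₁ k₂ h
  cases t with
  | nil => rfl
  | cons x xs => simp_all [aGo]

lemma main_insert : ∀ (n : Nat) (cs pre : List Char), cs.length ≤ n →
    (spacesIdx cs pre.length).foldl (fun l sp => PySem.List.insert l sp ' ')
      (pre ++ ((splitSpec cs).map (fun w => wdFrom w 0)).flatten)
    = pre ++ aGo cs 0 := by
  intro n
  induction n with
  | zero =>
    intro cs pre h
    have : cs = [] := List.length_eq_zero_iff.mp (Nat.le_zero.mp h)
    subst this
    simp [spacesIdx, splitSpec, aGo]
  | succ m ih =>
    intro cs pre h
    cases cs with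
    | nil => simp [spacesIdx, splitSpec, aGo]
    | cons c rest =>
      by_cases hc : PySem.Chars.isspace c = true
      · -- whitespace head
        rw [show splitSpec (c :: rest) = splitSpec rest by rw [splitSpec]; simp [hc]]
        rw [show spacesIdx (c :: rest) pre.length = (pre.length : Int) :: spacesIdx rest (pre.length + 1) by rw [spacesIdx]; simp [hc]]
        rw [List.foldl_cons, insert_mid]
        have hpre1 : pre.length + 1 = (pre ++ [' ']).length := by simp
        rw [show pre ++ ' ' :: ((splitSpec rest).map (fun w => wdFrom w 0)).flatten = (pre ++ [' ']) ++ ((splitSpec rest).map (fun w => wdFrom w 0)).flatten by simp]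
        rw [hpre1, ih rest (pre ++ [' ']) (by simpa using h)]
        simp [aGo, hc]
      · -- word head
        set P : Char → Bool := fun x => !PySem.Chars.isspace x with hP
        set w : List Char := c :: rest.takeWhile P with hw
        set rest' : List Char := rest.dropWhile P with hr
        have hsplit : c :: rest = w ++ rest' := by
          simp [hw, hr, List.takeWhile_append_dropWhile]
        have hwns : ∀ x ∈ w, PySem.Chars.isspace x = false := by
          intro x hx
          rcases List.mem_cons.mp hx with h1 | h1
          · subst h1; simpa using hc
          · have := List.mem_takeWhile_imp h1
            simpa [hP] using this
        have hss : splitSpec (c :: rest) = w :: splitSpec rest' := by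
          rw [splitSpec]; simp [hc, hw, hr, hP]
        have hsp : spacesIdx (c :: rest) pre.length = spacesIdx rest' (pre.length + w.length) := by
          calc spacesIdx (c :: rest) pre.length = spacesIdx (w ++ rest') pre.length := by rw [← hsplit]
          _ = spacesIdx rest' (pre.length + w.length) := spacesIdx_append_nonspace w rest' pre.length hwns
        rw [hss, hsp]
        have hlen2 : pre.length + w.length = (pre ++ wdFrom w 0).length := by
          simp [length_wdFrom]
        have hflat : ((w :: splitSpec rest').map (fun w => wdFrom w 0)).flatten
            = wdFrom w 0 ++ ((splitSpec rest').map (fun w => wdFrom w 0)).flatten := by simp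
        rw [hflat, show pre ++ (wdFrom w 0 ++ ((splitSpec rest').map (fun w => wdFrom w 0)).flatten) = (pre ++ wdFrom w 0) ++ ((splitSpec rest').map (fun w => wdFrom w 0)).flatten by simp, hlen2]
        have hrlen : rest'.length ≤ m := by
          have h1 : rest'.length ≤ rest.length := by
            rw [hr]; exact List.length_dropWhile_le P rest
          have h2 : rest.length ≤ m := by simpa using h
          omega
        rw [ih rest' (pre ++ wdFrom w 0) hrlen]
        have hhead : ∀ x ∈ rest'.head?, PySem.Chars.isspace x = true := by
          intro x hx
          cases hrest' : rest' with
          | nil => simp [hrest'] at hx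
          | cons y ys =>
            rw [hrest'] at hx
            simp at hx
            subst hx
            have := List.head?_dropWhile_not P rest
            rw [← hr, hrest'] at this
            simp [hP] at this
            exact this
        have : aGo (c :: rest) 0 = wdFrom w 0 ++ aGo rest' 0 := by
          calc aGo (c :: rest) 0 = aGo (w ++ rest') 0 := by rw [← hsplit]
          _ = wdFrom w 0 ++ aGo rest' (0 + w.length) := aGo_nonspace_append w rest' 0 hwns
          _ = wdFrom w 0 ++ aGo rest' 0 := by rw [aGo_head_space rest' (0 + w.length) 0 hhead]
        rw [this]
        simp

lemma toWeirdCase_eq_aGo (s : String) : toWeirdCase s = String.ofList (aGo s.toList 0) := by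
  unfold toWeirdCase
  have hspace : (PySem.List.pyRange 0 (PySem.Chars.len s.toList : Int) 1).foldl
      (fun acc i => if PySem.Chars.isspace (PySem.List.pyGetD s.toList i ' ') then acc ++ [i] else acc) []
      = spacesIdx s.toList 0 := by
    have h0 := space_fold s.toList [] []
    simpa using h0
  have hword : ∀ w : List Char, (PySem.List.pyRange 0 (PySem.Chars.len w : Int) 1).foldl
      (fun nw i => if PySem.Int.mod i 2 == 0
        then nw ++ [PySem.Chars.upperChar (PySem.List.pyGetD w i ' ')]
        else nw ++ [PySem.Chars.lowerChar (PySem.List.pyGetD w i ' ')]) []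
      = wdFrom w 0 := by
    intro w
    have h0 := word_fold w [] []
    simpa using h0
  have hwords : (PySem.Chars.split₀ s.toList).foldl (fun acc word =>
      acc ++ [(PySem.List.pyRange 0 (PySem.Chars.len word : Int) 1).foldl
        (fun nw i => if PySem.Int.mod i 2 == 0
          then nw ++ [PySem.Chars.upperChar (PySem.List.pyGetD word i ' ')]
          else nw ++ [PySem.Chars.lowerChar (PySem.List.pyGetD word i ' ')]) []]) []
      = (splitSpec s.toList).map (fun w => wdFrom w 0) := by
    rw [PySem.List.foldl_append_singleton_eq_map, split₀_eq_splitSpec]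
    exact List.map_congr_left (fun w _ => hword w)
  simp only [hspace, hwords, join_nil_eq_flatten]
  have hmain := main_insert s.toList.length s.toList [] (Nat.le_refl _)
  simp only [List.length_nil, List.nil_append] at hmain
  rw [hmain]

lemma aGo_eq_bGo : ∀ (cs : List Char) (k : Nat),
    (∀ c ∈ cs, PySem.Chars.isspace c = true → c = ' ') → aGo cs k = bGo cs k := by
  intro cs
  induction cs with
  | nil => intro k _; rfl
  | cons c rest ih =>
    intro k h
    by_cases hc : PySem.Chars.isspace c = true
    · have : c = ' ' := h c (by simp) hc
      subst this
      simp [aGo, bGo, hc, ih 0 (fun x hx hs => h x (by simp [hx]) hs)]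
    · simp [aGo, bGo, hc, ih (k + 1) (fun x hx hs => h x (by simp [hx]) hs)]

lemma aGo_ne_bGo : ∀ (cs : List Char) (k : Nat),
    (∃ c ∈ cs, PySem.Chars.isspace c = true ∧ c ≠ ' ') → aGo cs k ≠ bGo cs k := by
  intro cs
  induction cs with
  | nil => intro k h; rcases h with ⟨c, hc, _⟩; simp at hc
  | cons c rest ih =>
    intro k h
    by_cases hc : PySem.Chars.isspace c = true
    · by_cases he : c = ' '
      · subst he
        rcases h with ⟨d, hd, hds, hdne⟩
        have hd' : d ∈ rest := by
          rcases List.mem_cons.mp hd with h1 | h1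
          · exact absurd h1 hdne
          · exact h1
        simp only [aGo, bGo, hc]
        intro heq
        exact ih 0 ⟨d, hd', hds, hdne⟩ (by simpa using heq)
      · simp only [aGo, bGo, hc, if_pos]
        intro heq
        exact he ((List.cons.injEq _ _ _ _).mp heq).1.symm
    · rcases h with ⟨d, hd, hds, hdne⟩
      have hd' : d ∈ rest := by
        rcases List.mem_cons.mp hd with h1 | h1
        · subst h1; exact absurd hds (by simpa using hc)
        · exact h1
      simp only [aGo, bGo, hc, if_neg, Bool.false_eq_true, not_false_iff]
      intro heq
      have := (List.cons.injEq _ _ _ _).mp heq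
      exact ih (k + 1) ⟨d, hd', hds, hdne⟩ this.2

-- ===== VERDICT (by name: the statement is the Claim_ definition above) =====
theorem toWeirdCase_spec : Claim_unchanged_toWeirdCase := by
  intro s _ hnd
  rw [toWeirdCase_eq_aGo]
  unfold toWeirdCase_alt
  congr 1
  apply aGo_eq_bGo
  intro c hc hs
  by_contra hne
  exact hnd (List.any_eq_true.mpr ⟨c, hc, by simp [hs, hne]⟩)

set_option maxRecDepth 8192 in
theorem toWeirdCase_changed : Claim_changed_toWeirdCase := by
  unfold Claim_changed_toWeirdCase
  exact ⟨by decide, by decide, by decide, by decide, by decide⟩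

theorem toWeirdCase_tight : Claim_exact_toWeirdCase := by
  intro s _ hd
  rcases List.any_eq_true.mp hd with ⟨c, hc, hp⟩
  rw [Bool.and_eq_true] at hp
  have hd' : ∃ c ∈ s.toList, PySem.Chars.isspace c = true ∧ c ≠ ' ' :=
    ⟨c, hc, hp.1, by simpa using hp.2⟩
  rw [toWeirdCase_eq_aGo]
  unfold toWeirdCase_alt
  intro heq
  have hl : aGo s.toList 0 = bGo s.toList 0 := by
    have := congrArg String.toList heq
    simpa using this
  exact aGo_ne_bGo s.toList 0 hd' hl
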